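-- pv_equiv track=rewrite | github.com/Earbudgit/Tubes-Daspro-01-09- | Reyn/F03,F04,F05.py | dumstring
-- ===== SOURCE A (Python) =====
-- def length(lst): #len final
--     elmt = xappend(lst, "&")
--     count = 0
--     for i in range(100):
--         if elmt[i] == "&":
--             break
--         elif elmt[i] != "&":
--             count += 1
--
--     return count
--
-- def dumstring(list): #mengubah list[i] menjadi str
--     if length(list) == 0:
--         return ""
--     dumstr = str(list[0])
--     index = 1
--     while index < length(list):
--         dumstr += "" + str(list[index])
--         index += 1
--
--     return dumstr
--
-- def xappend(lst1,lst2): #append 2 list menjadi list baru, != append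
--     lst = [*lst1,*lst2]
--     return lst
-- ===== SOURCE B (Python) =====
-- def dumstring(list):
--     return "".join(str(x) for x in list[:100])
-- ===== Notes on version B (the rewrite author's own statement) =====
-- stated objective: faster
-- what changed: Replaces the sentinel-append length helper (which copies the whole list and is recomputed on every while-loop iteration) and the index-based while loop by a single slice-and-join over the first 100 elements.
import Mathlib
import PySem

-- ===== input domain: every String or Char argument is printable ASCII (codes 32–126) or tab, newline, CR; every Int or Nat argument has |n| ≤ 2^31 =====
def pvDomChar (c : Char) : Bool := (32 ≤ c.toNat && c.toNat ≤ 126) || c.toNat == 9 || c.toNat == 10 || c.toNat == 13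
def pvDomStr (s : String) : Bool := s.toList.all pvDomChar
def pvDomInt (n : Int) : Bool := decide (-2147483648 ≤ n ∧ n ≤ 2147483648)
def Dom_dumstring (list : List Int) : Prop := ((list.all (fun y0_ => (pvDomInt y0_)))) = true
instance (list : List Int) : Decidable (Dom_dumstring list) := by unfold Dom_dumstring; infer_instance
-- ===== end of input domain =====

-- B replaces A's sentinel-append `length` helper (recomputed on every while iteration) and
-- index-driven while loop by a single `"".join(str(x) for x in list[:100])`; objective: simpler.

-- ===== PORT A =====
-- xappend(lst, "&") produces a heterogeneous list: the Int elements (as `some`) plus the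
-- one-character sentinel "&" (as `none`).  `elmt[i] == "&"` is `· = none` on this encoding,
-- exact because an Int element never equals the string "&".
def xappendA (lst : List Int) : List (Option Int) := lst.map some ++ [none]

-- the `for i in range(100): … break …` loop of `length`, i = loop counter, count = accumulator;
-- the `none` branch of the match is Python's IndexError (unreachable: the sentinel breaks first).
def lengthLoopA (elmt : List (Option Int)) (i : Nat) (count : Int) : Int :=
  if i < 100 then
    match elmt[i]? with
    | some none => count          -- elmt[i] == "&": break
    | some (some _) => lengthLoopA elmt (i + 1) (count + 1)
    | none => count               -- IndexError in Python; never reached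
  else count
termination_by 100 - i

def lengthA (lst : List Int) : Int := lengthLoopA (xappendA lst) 0 0

-- str(list[index]): the `none` branch is Python's IndexError (unreachable inside the loop).
def strAtA (list : List Int) (index : Int) : String :=
  match PySem.List.pyGet? list index with
  | some v => PySem.Int.toStr v
  | none => ""

-- the while loop of dumstring; the bound `length(list)` is re-evaluated each iteration as in A.
def dumLoopA (list : List Int) (index : Int) (dumstr : String) : String :=
  if h : index < lengthA list then
    dumLoopA list (index + 1) (dumstr ++ "" ++ strAtA list index)
  else dumstr
termination_by (lengthA list - index).toNat
decreasing_by omega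

def dumstring (list : List Int) : String :=
  if lengthA list = 0 then ""
  else dumLoopA list 1 (strAtA list 0)

-- ===== PORT B =====
def dumstring_alt (list : List Int) : String :=
  PySem.Str.join "" ((PySem.List.slice list none (some 100)).map PySem.Int.toStr)

-- ===== PRECONDITION & SPEC =====
def Spec_dumstring (list : List Int) (out : String) : Prop := out = dumstring_alt list
instance (list : List Int) (out : String) : Decidable (Spec_dumstring list out) := by unfold Spec_dumstring; infer_instance

-- ===== CLAIM (what is proved, stated in full; the proofs are below) =====
def Claim_equal_dumstring : Prop := ∀ (list : List Int), Dom_dumstring list → Spec_dumstring list (dumstring list)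

-- ===== LEMMAS AND PROOFS =====

-- A's length() counts min(len, 100): the loop walks until the sentinel or the 100 cap.
theorem lengthLoopA_eq (lst : List Int) (i : Nat) (count : Int)
    (h : i ≤ min lst.length 100) :
    lengthLoopA (xappendA lst) i count = count + ((min lst.length 100 : Nat) - (i : Nat) : Int) := by
  by_cases hlt : i < min lst.length 100
  · have hi : i < lst.length := by omega
    have h100 : i < 100 := by omega
    have hidx : (xappendA lst)[i]? = some (some lst[i]) := by
      unfold xappendA
      rw [List.getElem?_append_left (by simpa using hi)]
      simp [List.getElem?_eq_getElem hi]
    rw [lengthLoopA, if_pos h100]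
    simp only [hidx]
    rw [lengthLoopA_eq lst (i + 1) (count + 1) (by omega)]
    push_cast
    omega
  · -- i = min lst.length 100: either the cap (guard fails) or the sentinel (break)
    have hie : i = min lst.length 100 := by omega
    rw [lengthLoopA]
    by_cases h100 : i < 100
    · have hil : i = lst.length := by omega
      have hidx : (xappendA lst)[i]? = some none := by
        subst hil
        simp [xappendA]
      rw [if_pos h100]
      simp only [hidx]
      omega
    · rw [if_neg h100]
      omega
termination_by 100 - i

theorem lengthA_eq (lst : List Int) : lengthA lst = ((min lst.length 100 : Nat) : Int) := by
  rw [lengthA, lengthLoopA_eq lst 0 0 (by omega)]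
  omega

-- "".join distributes over cons.
theorem join_empty_cons (s : String) (rest : List String) :
    PySem.Str.join "" (s :: rest) = s ++ PySem.Str.join "" rest := by
  rw [← String.toList_inj]
  cases rest with
  | nil =>
      simp [PySem.Str.toList_join, String.toList_append, PySem.Chars.join_singleton,
        PySem.Chars.join_nil]
  | cons t ts =>
      simp [PySem.Str.toList_join, String.toList_append, PySem.Chars.join_cons_cons]

-- the while loop appends str of elements index, …, min(len,100)-1
theorem dumLoopA_eq (list : List Int) (j : Nat) (dumstr : String)
    (h : j ≤ min list.length 100) :
    dumLoopA list (j : Int) dumstr =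
      dumstr ++ PySem.Str.join ""
        (((list.drop j).take (min list.length 100 - j)).map PySem.Int.toStr) := by
  by_cases hlt : j < min list.length 100
  · have hj : j < list.length := by omega
    have hguard : (j : Int) < lengthA list := by rw [lengthA_eq]; exact_mod_cast hlt
    rw [dumLoopA, dif_pos hguard]
    have hstr : strAtA list (j : Int) = PySem.Int.toStr list[j] := by
      simp [strAtA, PySem.List.pyGet?_natCast, List.getElem?_eq_getElem hj]
    have hcast : ((j : Int) + 1) = ((j + 1 : Nat) : Int) := by push_cast; ring
    rw [hstr, hcast, dumLoopA_eq list (j + 1) _ (by omega)]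
    have hdt : (list.drop j).take (min list.length 100 - j)
        = list[j] :: (list.drop (j + 1)).take (min list.length 100 - (j + 1)) := by
      rw [List.drop_eq_getElem_cons hj]
      rw [List.take_cons (by omega)]
      congr 1
    rw [hdt, List.map_cons, join_empty_cons]
    rw [← String.toList_inj]
    simp [String.toList_append]
  · have hje : j = min list.length 100 := by omega
    have hguard : ¬ ((j : Int) < lengthA list) := by rw [lengthA_eq]; omega
    rw [dumLoopA, dif_neg hguard]
    have : min list.length 100 - j = 0 := by omega
    rw [this]
    rw [← String.toList_inj]
    simp [String.toList_append, PySem.Str.toList_join, PySem.Chars.join_nil]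
termination_by min list.length 100 - j

theorem take_min_100 (list : List Int) : list.take (min list.length 100) = list.take 100 := by
  rcases Nat.le_total list.length 100 with h | h
  · rw [min_eq_left h, List.take_length, List.take_of_length_le h]
  · rw [min_eq_right h]

-- ===== VERDICT (by name: the statement is the Claim_ definition above) =====
theorem dumstring_spec : Claim_equal_dumstring := by
  intro list _
  unfold Spec_dumstring dumstring dumstring_alt
  rw [PySem.List.slice_to list (b := 100) (by norm_num)]
  have h100 : (100 : Int).toNat = 100 := rfl
  rw [h100]
  by_cases h0 : lengthA list = 0
  · have hlen : list.length = 0 := by rw [lengthA_eq] at h0; omega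
    rw [if_pos h0]
    rw [List.eq_nil_of_length_eq_zero hlen]
    rw [← String.toList_inj]
    simp [PySem.Str.toList_join, PySem.Chars.join_nil]
  · rw [if_neg h0]
    have hlen : 0 < min list.length 100 := by
      rw [lengthA_eq] at h0; omega
    have hl : 0 < list.length := by omega
    have h1 : (1 : Int) = ((1 : Nat) : Int) := by norm_num
    rw [h1, dumLoopA_eq list 1 _ (by omega)]
    have hstr : strAtA list 0 = PySem.Int.toStr list[0] := by
      simp [strAtA, PySem.List.pyGet?_zero, List.getElem?_eq_getElem hl]
    rw [hstr]
    rw [← take_min_100]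
    have htk : list.take (min list.length 100)
        = list[0] :: (list.drop 1).take (min list.length 100 - 1) := by
      obtain ⟨a, t, hat⟩ : ∃ a t, list = a :: t := by
        cases list with
        | nil => simp at hl
        | cons a t => exact ⟨a, t, rfl⟩
      subst hat
      rw [List.take_cons hlen]
      simp
    rw [htk, List.map_cons, join_empty_cons]
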